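-- pv_equiv track=rewrite | github.com/klane/pythello | pythello/board/mask.py | edge_mask
-- ===== SOURCE A (Python) =====
-- def corner_mask(size: int) -> int:
--     top_bottom = int('1' + '0' * (size - 2) + '1', 2)
--     corner = 0
--     corner |= top_bottom
--     corner |= top_bottom << (size**2 - size)
--     return corner
--
-- def edge_mask(size: int, remove_corners: bool = True) -> int:
--     top_bottom = int('1' * size, 2)
--     edge = 0
--     edge |= top_bottom
--     edge |= top_bottom << (size**2 - size)
--
--     for i in range(size - 1):
--         edge |= 3 << ((i + 1) * size - 1)
--
--     if remove_corners:
--         edge &= ~corner_mask(size)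
--
--     return edge
-- ===== SOURCE B (Python) =====
-- def edge_mask(size: int, remove_corners: bool = True) -> int:
--     edge = 0
--     for p in range(size * size):
--         row = p // size
--         col = p % size
--         if row == 0 or row == size - 1 or col == 0 or col == size - 1:
--             if not (remove_corners and (row == 0 or row == size - 1) and (col == 0 or col == size - 1)):
--                 edge |= 1 << p
--     return edge
-- ===== Notes on version B (the rewrite author's own statement) =====
-- stated objective: simpler
-- what changed: Replaces A's binary-string row masks, side-column shift loop and separate corner-mask subtraction with a single scan over all size*size cells that sets bit p directly from a per-cell row/col edge-and-corner predicate.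
import Mathlib
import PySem

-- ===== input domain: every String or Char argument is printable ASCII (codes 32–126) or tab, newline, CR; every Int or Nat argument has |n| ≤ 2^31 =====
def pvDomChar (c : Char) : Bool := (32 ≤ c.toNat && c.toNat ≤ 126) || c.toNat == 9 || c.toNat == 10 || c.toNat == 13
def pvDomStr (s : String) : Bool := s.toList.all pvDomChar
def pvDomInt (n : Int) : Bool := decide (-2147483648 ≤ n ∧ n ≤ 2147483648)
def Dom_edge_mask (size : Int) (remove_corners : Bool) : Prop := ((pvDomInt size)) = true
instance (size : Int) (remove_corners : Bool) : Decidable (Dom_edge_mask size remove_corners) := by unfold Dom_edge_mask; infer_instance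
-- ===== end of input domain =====

-- B is a single per-cell scan (one uniform edge/corner predicate per bit) replacing A's row masks,
-- side-shift loop and corner subtraction; objective: simpler, not faster.

-- ===== PORT A =====
-- Hand port of int(s, 2): exact for the strings this module builds (nonempty strings of '0'/'1'
-- digits, no sign/space/underscore), and none (= ValueError) on the empty string (size <= 0).
def pvBinVal? (cs : List Char) : Option Int :=
  if cs = [] then none
  else if cs.all (fun c => c == '0' || c == '1') then
    some (cs.foldl (fun a c => 2 * a + (if c == '1' then 1 else 0)) 0)
  else none

-- shift amounts: Python raises on a negative shift; here size**2 - size ≥ 0 for every int size,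
-- and the loop shift (i+1)*size - 1 ≥ 0 whenever the loop body runs, so .toNat is exact.
def corner_mask (size : Int) : Int :=
  match pvBinVal? ('1' :: (PySem.List.pyRepeat ['0'] (size - 2) ++ ['1'])) with
  | none => 0  -- unreachable: that string is never empty
  | some top_bottom =>
      let corner : Int := 0
      let corner := PySem.Int.bor corner top_bottom
      let corner := PySem.Int.bor corner (top_bottom <<< (size ^ 2 - size).toNat)
      corner

def edge_mask (size : Int) (remove_corners : Bool) : Int :=
  match pvBinVal? (PySem.List.pyRepeat ['1'] size) with
  | none => 0  -- Python raises ValueError here (size ≤ 0); excluded by Pre_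
  | some top_bottom =>
      let edge : Int := 0
      let edge := PySem.Int.bor edge top_bottom
      let edge := PySem.Int.bor edge (top_bottom <<< (size ^ 2 - size).toNat)
      let edge := (PySem.List.pyRange 0 (size - 1) 1).foldl
        (fun e i => PySem.Int.bor e ((3 : Int) <<< ((i + 1) * size - 1).toNat)) edge
      if remove_corners then PySem.Int.band edge (Int.not (corner_mask size)) else edge

-- ===== PORT B =====
def edge_mask_alt (size : Int) (remove_corners : Bool) : Int :=
  (PySem.List.pyRange 0 (size * size) 1).foldl
    (fun edge p =>
      let row := PySem.Int.floordiv p size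
      let col := PySem.Int.mod p size
      if (row == 0 || row == size - 1 || col == 0 || col == size - 1)
          && !(remove_corners && (row == 0 || row == size - 1) && (col == 0 || col == size - 1))
      then PySem.Int.bor edge ((1 : Int) <<< p.toNat)
      else edge) 0

-- ===== PRECONDITION & SPEC =====
-- Pre_ excludes exactly size ≤ 0, where Python's int('1'*size, 2) raises ValueError on ''.
def Pre_edge_mask (size : Int) (remove_corners : Bool) : Prop := 1 ≤ size
instance (size : Int) (remove_corners : Bool) : Decidable (Pre_edge_mask size remove_corners) := by unfold Pre_edge_mask; infer_instance
def pvWitness_edge_mask : Int × Bool := (5, true)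

def Spec_edge_mask (size : Int) (remove_corners : Bool) (out : Int) : Prop := out = edge_mask_alt size remove_corners
instance (size : Int) (remove_corners : Bool) (out : Int) : Decidable (Spec_edge_mask size remove_corners out) := by unfold Spec_edge_mask; infer_instance

-- ===== CLAIM (what is proved, stated in full; the proofs are below) =====
def Claim_equal_edge_mask : Prop := ∀ (size : Int) (remove_corners : Bool), Dom_edge_mask size remove_corners → Pre_edge_mask size remove_corners → Spec_edge_mask size remove_corners (edge_mask size remove_corners)

-- ===== LEMMAS AND PROOFS =====

-- Nat-level values of the two ports (proof-side only)
def pvEdgeN (s : ℕ) : ℕ :=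
  (List.range (s - 1)).foldl (fun e i => e ||| (3 <<< ((i + 1) * s - 1)))
    ((2 ^ s - 1) ||| ((2 ^ s - 1) <<< (s * s - s)))

def pvCornerN (s : ℕ) : ℕ := (2 ^ (s - 1) + 1) ||| ((2 ^ (s - 1) + 1) <<< (s * s - s))

def pvCondN (s : ℕ) (rc : Bool) (p : ℕ) : Bool :=
  (p / s == 0 || p / s == s - 1 || p % s == 0 || p % s == s - 1)
    && !(rc && (p / s == 0 || p / s == s - 1) && (p % s == 0 || p % s == s - 1))

def pvBN (s : ℕ) (rc : Bool) : ℕ :=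
  (List.range (s * s)).foldl (fun e p => if pvCondN s rc p then e ||| (1 <<< p) else e) 0

theorem pv_lor_eq_add (a : ℕ) : ∀ b : ℕ, a &&& b = 0 → a ||| b = a + b := by
  induction a using Nat.binaryRec with
  | zero => simp
  | bit x m ih =>
    intro b h
    induction b using Nat.binaryRec with
    | zero => simp
    | bit y n _ =>
      rw [Nat.land_bit] at h
      rw [Nat.bit_eq_zero_iff] at h
      rw [Nat.lor_bit, ih n h.1]
      cases x <;> cases y <;> simp_all [Nat.bit] <;> omega

theorem pv_foldl_ones (n : ℕ) : ∀ (a : ℤ),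
    (List.replicate n '1').foldl (fun a c => 2 * a + (if c == '1' then 1 else 0)) a
      = a * 2 ^ n + (2 ^ n - 1) := by
  induction n with
  | zero => intro a; simp
  | succ n ih =>
    intro a
    rw [List.replicate_succ, List.foldl_cons, ih]
    simp; ring

theorem pv_foldl_zeros (n : ℕ) : ∀ (a : ℤ),
    (List.replicate n '0').foldl (fun a c => 2 * a + (if c == '1' then 1 else 0)) a = a * 2 ^ n := by
  induction n with
  | zero => intro a; simp
  | succ n ih =>
    intro a
    rw [List.replicate_succ, List.foldl_cons, ih]
    simp; ring

theorem pv_parse_ones (s : ℕ) (hs : 1 ≤ s) :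
    pvBinVal? (List.replicate s '1') = some ((2 ^ s - 1 : ℕ) : ℤ) := by
  have h1 : (1:ℕ) ≤ 2 ^ s := Nat.one_le_two_pow
  unfold pvBinVal?
  rw [if_neg (by simp; omega), if_pos (by simp), pv_foldl_ones]
  push_cast [h1]
  ring_nf

theorem pv_parse_corner (s : ℕ) (hs : 2 ≤ s) :
    pvBinVal? ('1' :: (List.replicate (s - 2) '0' ++ ['1'])) = some ((2 ^ (s - 1) + 1 : ℕ) : ℤ) := by
  unfold pvBinVal?
  rw [if_neg (by simp), if_pos (by simp)]
  rw [List.foldl_cons, List.foldl_append, pv_foldl_zeros]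
  have : s - 1 = (s - 2) + 1 := by omega
  simp [this]
  ring

theorem pv_shift_cast (m k : ℕ) : ((m : ℤ) <<< k) = ((m <<< k : ℕ) : ℤ) := by
  simp [Int.shiftLeft_eq, Nat.shiftLeft_eq]

theorem pv_band_not (e c : ℕ) : PySem.Int.band (e : ℤ) (Int.not (c : ℤ)) = ((e - (e &&& c) : ℕ) : ℤ) := by
  have h : Int.not (c : ℤ) = Int.negSucc c := rfl
  rw [h]; simp [PySem.Int.band]

theorem pv_le_sq (s : ℕ) : s ≤ s * s := by
  cases s with
  | zero => simp
  | succ n => exact Nat.le_mul_of_pos_left _ (Nat.succ_pos n)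

theorem pv_sq_sub (s : ℕ) : ((s:ℤ) ^ 2 - s).toNat = s * s - s := by
  have h : ((s:ℤ) ^ 2 - s) = ((s * s - s : ℕ) : ℤ) := by
    rw [Nat.cast_sub (pv_le_sq s)]; push_cast; ring
  rw [h, Int.toNat_natCast]

theorem pv_bor_zero_left (m : ℕ) : PySem.Int.bor 0 (m : ℤ) = (m : ℤ) := by
  rw [show (0:ℤ) = ((0:ℕ):ℤ) from rfl, PySem.Int.bor_natCast]; simp

theorem pv_corner_eq (s : ℕ) (hs : 2 ≤ s) : corner_mask (s : ℤ) = ((pvCornerN s : ℕ) : ℤ) := by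
  have hrep : PySem.List.pyRepeat ['0'] ((s:ℤ) - 2) = List.replicate (s - 2) '0' := by
    rw [PySem.List.pyRepeat_singleton]
    congr 1
    omega
  simp only [corner_mask, hrep, pv_parse_corner s hs]
  simp only [pv_bor_zero_left, pv_sq_sub, pv_shift_cast, PySem.Int.bor_natCast]
  rfl

theorem pv_range_cast (s : ℕ) : PySem.List.pyRange 0 ((s:ℤ) - 1) 1 = (List.range (s - 1)).map (Nat.cast : ℕ → ℤ) := by
  rw [PySem.List.pyRange_one]
  have h1 : (((s:ℤ) - 1) - 0).toNat = s - 1 := by omega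
  rw [h1]
  simp only [zero_add]

theorem pv_range_cast_sq (s : ℕ) : PySem.List.pyRange 0 ((s:ℤ) * (s:ℤ)) 1 = (List.range (s * s)).map (Nat.cast : ℕ → ℤ) := by
  have h : ((s:ℤ) * s) = ((s * s : ℕ) : ℤ) := by push_cast; ring
  rw [h, PySem.List.pyRange_one]
  have h1 : (((s * s : ℕ):ℤ) - 0).toNat = s * s := by omega
  rw [h1]
  simp only [zero_add]

theorem pv_shift3 (k : ℕ) : ((3:ℤ) <<< k) = ((3 <<< k : ℕ) : ℤ) := by
  have := pv_shift_cast 3 k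
  exact_mod_cast this

theorem pv_shift1 (k : ℕ) : ((1:ℤ) <<< k) = ((1 <<< k : ℕ) : ℤ) := by
  have := pv_shift_cast 1 k
  exact_mod_cast this

theorem pv_loopA_list (s : ℕ) (hs : 1 ≤ s) : ∀ (l : List ℕ) (e : ℕ),
    (l.map (Nat.cast : ℕ → ℤ)).foldl (fun E i => PySem.Int.bor E ((3 : ℤ) <<< ((i + 1) * (s:ℤ) - 1).toNat)) (e : ℤ)
      = ((l.foldl (fun E i => E ||| (3 <<< ((i + 1) * s - 1))) e : ℕ) : ℤ) := by
  intro l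
  induction l with
  | nil => intro e; rfl
  | cons x t ih =>
    intro e
    simp only [List.map_cons, List.foldl_cons]
    have h1 : ((x:ℤ) + 1) * (s:ℤ) - 1 = (((x+1)*s - 1 : ℕ) : ℤ) := by
      rw [Nat.cast_sub (by nlinarith)]
      push_cast; ring
    rw [h1, Int.toNat_natCast, pv_shift3 ((x+1)*s - 1), PySem.Int.bor_natCast, ih]

theorem pv_beq_cast (a b : ℕ) : ((a:ℤ) == (b:ℤ)) = (a == b) := by
  by_cases h : a = b <;> simp [h]

theorem pv_stepB (s : ℕ) (hs : 1 ≤ s) (rc : Bool) (E : ℤ) (k : ℕ) :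
    (if (PySem.Int.floordiv ((k:ℤ)) ((s:ℤ)) == 0 || PySem.Int.floordiv ((k:ℤ)) ((s:ℤ)) == (s:ℤ) - 1
          || PySem.Int.mod ((k:ℤ)) ((s:ℤ)) == 0 || PySem.Int.mod ((k:ℤ)) ((s:ℤ)) == (s:ℤ) - 1)
         && !(rc && (PySem.Int.floordiv ((k:ℤ)) ((s:ℤ)) == 0 || PySem.Int.floordiv ((k:ℤ)) ((s:ℤ)) == (s:ℤ) - 1)
              && (PySem.Int.mod ((k:ℤ)) ((s:ℤ)) == 0 || PySem.Int.mod ((k:ℤ)) ((s:ℤ)) == (s:ℤ) - 1))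
     then PySem.Int.bor E ((1 : Int) <<< ((k:ℤ)).toNat)
     else E)
    = (if pvCondN s rc k then PySem.Int.bor E (((1 <<< k : ℕ)) : ℤ) else E) := by
  have hs1 : ((s:ℤ) - 1) = (((s - 1 : ℕ)) : ℤ) := by omega
  have h0 : (0:ℤ) = ((0:ℕ):ℤ) := rfl
  rw [h0, hs1]
  simp only [PySem.Int.floordiv_natCast, PySem.Int.mod_natCast, Int.toNat_natCast, pv_shift1,
    pv_beq_cast, pvCondN]
  rfl

theorem pv_loopB_list (s : ℕ) (hs : 1 ≤ s) (rc : Bool) : ∀ (l : List ℕ) (e : ℕ),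
    (l.map (Nat.cast : ℕ → ℤ)).foldl (fun edge p =>
        if (PySem.Int.floordiv p ((s:ℤ)) == 0 || PySem.Int.floordiv p ((s:ℤ)) == (s:ℤ) - 1
              || PySem.Int.mod p ((s:ℤ)) == 0 || PySem.Int.mod p ((s:ℤ)) == (s:ℤ) - 1)
            && !(rc && (PySem.Int.floordiv p ((s:ℤ)) == 0 || PySem.Int.floordiv p ((s:ℤ)) == (s:ℤ) - 1)
                 && (PySem.Int.mod p ((s:ℤ)) == 0 || PySem.Int.mod p ((s:ℤ)) == (s:ℤ) - 1))
        then PySem.Int.bor edge ((1 : Int) <<< p.toNat)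
        else edge) (e : ℤ)
      = ((l.foldl (fun E k => if pvCondN s rc k then E ||| (1 <<< k) else E) e : ℕ) : ℤ) := by
  intro l
  induction l with
  | nil => intro e; rfl
  | cons x t ih =>
    intro e
    simp only [List.map_cons, List.foldl_cons]
    rw [pv_stepB s hs rc]
    by_cases h : pvCondN s rc x = true
    · simp only [h, if_true, PySem.Int.bor_natCast, ih]
    · simp only [Bool.not_eq_true] at h
      simp only [h, Bool.false_eq_true, if_false, ih]

theorem pv_A_eq (s : ℕ) (hs : 2 ≤ s) (rc : Bool) :
    edge_mask (s : ℤ) rc =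
      ((if rc then pvEdgeN s - (pvEdgeN s &&& pvCornerN s) else pvEdgeN s : ℕ) : ℤ) := by
  have hrep : PySem.List.pyRepeat ['1'] ((s:ℤ)) = List.replicate s '1' := by
    rw [PySem.List.pyRepeat_singleton, Int.toNat_natCast]
  have hA : (PySem.List.pyRange 0 ((s:ℤ) - 1) 1).foldl
      (fun e i => PySem.Int.bor e ((3 : ℤ) <<< ((i + 1) * (s:ℤ) - 1).toNat))
      (((2 ^ s - 1 ||| (2 ^ s - 1) <<< (s * s - s) : ℕ)) : ℤ) = ((pvEdgeN s : ℕ) : ℤ) := by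
    rw [pv_range_cast]
    exact pv_loopA_list s (by omega) (List.range (s - 1)) _
  simp only [edge_mask, hrep, pv_parse_ones s (by omega)]
  rw [pv_bor_zero_left, pv_sq_sub, pv_shift_cast, PySem.Int.bor_natCast, hA]
  cases rc
  · simp only [Bool.false_eq_true, if_false]
  · simp only [if_true, pv_corner_eq s hs, pv_band_not]

theorem pv_B_eq (s : ℕ) (hs : 1 ≤ s) (rc : Bool) :
    edge_mask_alt (s : ℤ) rc = ((pvBN s rc : ℕ) : ℤ) := by
  have hB := pv_loopB_list s hs rc (List.range (s * s)) 0
  simp only [edge_mask_alt]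
  rw [pv_range_cast_sq]
  exact_mod_cast hB

theorem pv_foldl_lor_testBit (f : ℕ → ℕ) : ∀ (l : List ℕ) (e : ℕ) (p : ℕ),
    (l.foldl (fun E i => E ||| f i) e).testBit p = (e.testBit p || l.any (fun i => (f i).testBit p)) := by
  intro l
  induction l with
  | nil => intro e p; simp
  | cons x t ih =>
    intro e p
    simp only [List.foldl_cons, List.any_cons, ih, Nat.testBit_lor, Bool.or_assoc]

theorem pv_foldl_lorif_testBit (c : ℕ → Bool) (f : ℕ → ℕ) : ∀ (l : List ℕ) (e : ℕ) (p : ℕ),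
    (l.foldl (fun E i => if c i then E ||| f i else E) e).testBit p
      = (e.testBit p || l.any (fun i => c i && (f i).testBit p)) := by
  intro l
  induction l with
  | nil => intro e p; simp
  | cons x t ih =>
    intro e p
    simp only [List.foldl_cons, List.any_cons]
    by_cases h : c x = true
    · simp only [h, if_true, ih, Nat.testBit_lor, Bool.or_assoc, Bool.true_and]
    · simp only [Bool.not_eq_true] at h
      simp only [h, Bool.false_eq_true, if_false, ih, Bool.false_and, Bool.false_or]

theorem pv_tb_pow_add_one (a : ℕ) (ha : 1 ≤ a) (m : ℕ) :
    (2 ^ a + 1).testBit m = (decide (m = 0) || decide (m = a)) := by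
  have hand : 2 ^ a &&& 1 = 0 := by
    rw [Nat.and_one_is_mod]
    have : a = (a - 1) + 1 := by omega
    rw [this, pow_succ, Nat.mul_mod_left]
  have hadd : 2 ^ a + 1 = 2 ^ a ||| 1 := (pv_lor_eq_add _ _ hand).symm
  rw [hadd, Nat.testBit_lor, Nat.testBit_two_pow,
    show (1:ℕ) = 2^0 from rfl, Nat.testBit_two_pow]
  by_cases h0 : m = 0 <;> by_cases h1 : m = a <;> simp [h0, h1] <;> try omega

theorem pv_tb_one (k m : ℕ) : ((1 : ℕ) <<< k).testBit m = decide (m = k) := by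
  rw [Nat.testBit_shiftLeft, show (1:ℕ) = 2^1 - 1 from rfl, Nat.testBit_two_pow_sub_one]
  by_cases h : k ≤ m
  · by_cases h2 : m = k <;> simp [h, h2] <;> omega
  · simp [h] <;> omega

theorem pv_testBit_three (m : ℕ) : Nat.testBit 3 m = decide (m < 2) := by
  rw [show (3:ℕ) = 2^2 - 1 from rfl, Nat.testBit_two_pow_sub_one]

theorem pv_divmod_of (s r c : ℕ) (hs : 0 < s) (hc : c < s) :
    (s * r + c) / s = r ∧ (s * r + c) % s = c :=
  ⟨by rw [Nat.mul_add_div hs, Nat.div_eq_of_lt hc, Nat.add_zero],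
   by rw [Nat.mul_add_mod, Nat.mod_eq_of_lt hc]⟩

theorem pv_top_iff (s p : ℕ) (hs : 0 < s) (hp : p < s * s) : p / s = s - 1 ↔ s * s - s ≤ p := by
  have hms : s * (s - 1) = s * s - s := by rw [Nat.mul_sub, Nat.mul_one]
  have hsq : s ≤ s * s := pv_le_sq s
  constructor
  · intro h
    have hd := Nat.div_add_mod p s
    rw [h, hms] at hd
    omega
  · intro h
    have h1 : (s * s - s) / s ≤ p / s := Nat.div_le_div_right h
    have h2 : (s * s - s) / s = s - 1 := by rw [← hms, Nat.mul_div_cancel_left _ hs]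
    have h3 : p / s < s := (Nat.div_lt_iff_lt_mul hs).mpr hp
    omega

theorem pv_edge_iff (s : ℕ) (hs : 2 ≤ s) (p : ℕ) :
    (p < s ∨ (s * s - s ≤ p ∧ p - (s * s - s) < s)
        ∨ (∃ i, i < s - 1 ∧ ((i + 1) * s - 1 ≤ p ∧ p - ((i + 1) * s - 1) < 2)))
    ↔ (p < s * s ∧ (p / s = 0 ∨ p / s = s - 1 ∨ p % s = 0 ∨ p % s = s - 1)) := by
  have hs0 : 0 < s := by omega
  have hms : s * (s - 1) = s * s - s := by rw [Nat.mul_sub, Nat.mul_one]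
  have hsq : s ≤ s * s := pv_le_sq s
  constructor
  · rintro (h | ⟨h1, h2⟩ | ⟨i, hi, h1, h2⟩)
    · exact ⟨by omega, Or.inl (Nat.div_eq_of_lt h)⟩
    · have hp : p < s * s := by omega
      exact ⟨hp, Or.inr (Or.inl ((pv_top_iff s p hs0 hp).mpr h1))⟩
    · have hcomm : (i + 1) * s = s * (i + 1) := Nat.mul_comm _ _
      have hi1 : s * (i + 1) = s * i + s := by rw [Nat.mul_add, Nat.mul_one]
      have hpos : 1 ≤ (i + 1) * s := Nat.mul_pos (by omega) hs0
      have hile : i + 1 ≤ s - 1 := by omega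
      have hbound : (i + 1) * s ≤ (s - 1) * s := Nat.mul_le_mul_right s hile
      have hms2 : (s - 1) * s = s * s - s := by rw [Nat.mul_comm, hms]
      rcases (by omega : p = (i + 1) * s - 1 ∨ p = (i + 1) * s) with hp | hp
      · have hpe : p = s * i + (s - 1) := by omega
        have hd := pv_divmod_of s i (s - 1) hs0 (by omega)
        rw [← hpe] at hd
        exact ⟨by omega, Or.inr (Or.inr (Or.inr hd.2))⟩
      · have hpe : p = s * (i + 1) + 0 := by omega
        have hd := pv_divmod_of s (i + 1) 0 hs0 hs0
        rw [← hpe] at hd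
        exact ⟨by omega, Or.inr (Or.inr (Or.inl hd.2))⟩
  · rintro ⟨hp, (h | h | h | h)⟩
    · left
      rw [Nat.div_eq_zero_iff] at h
      omega
    · right; left
      have h1 := (pv_top_iff s p hs0 hp).mp h
      have hd := Nat.div_add_mod p s
      have hm := Nat.mod_lt p hs0
      rw [h, hms] at hd
      exact ⟨h1, by omega⟩
    · have hd := Nat.div_add_mod p s
      rw [h, Nat.add_zero] at hd
      by_cases hr : p / s = 0
      · left
        rw [Nat.div_eq_zero_iff] at hr
        omega
      · right; right
        have hrlt : p / s < s := (Nat.div_lt_iff_lt_mul hs0).mpr hp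
        have hge : 1 ≤ p / s := Nat.pos_of_ne_zero hr
        have hp1 : p ≠ 0 := by
          rw [← hd]
          exact Nat.mul_ne_zero (by omega) hr
        refine ⟨p / s - 1, by omega, ?_⟩
        have hq : (p / s - 1 + 1) * s = p := by
          rw [show p / s - 1 + 1 = p / s from by omega, Nat.mul_comm]
          exact hd
        rw [hq]
        omega
    · by_cases hr : p / s = s - 1
      · right; left
        have h1 := (pv_top_iff s p hs0 hp).mp hr
        have hd := Nat.div_add_mod p s
        rw [h, hr, hms] at hd
        exact ⟨h1, by omega⟩
      · right; right
        have hd := Nat.div_add_mod p s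
        rw [h] at hd
        have hrlt : p / s < s := (Nat.div_lt_iff_lt_mul hs0).mpr hp
        refine ⟨p / s, by omega, ?_⟩
        have hq : (p / s + 1) * s = p + 1 := by
          rw [Nat.add_mul, Nat.one_mul, Nat.mul_comm]
          omega
        rw [hq]
        omega

theorem pv_corner_iff (s : ℕ) (hs : 2 ≤ s) (p : ℕ) :
    (p = 0 ∨ p = s - 1 ∨ p = s * s - s ∨ p = s * s - 1)
    ↔ (p < s * s ∧ (p / s = 0 ∨ p / s = s - 1) ∧ (p % s = 0 ∨ p % s = s - 1)) := by
  have hs0 : 0 < s := by omega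
  have hms : s * (s - 1) = s * s - s := by rw [Nat.mul_sub, Nat.mul_one]
  have hsq : s ≤ s * s := pv_le_sq s
  constructor
  · rintro (rfl | rfl | rfl | rfl)
    · exact ⟨by omega, Or.inl (by simp), Or.inl (by simp)⟩
    · exact ⟨by omega, Or.inl (Nat.div_eq_of_lt (by omega)), Or.inr (Nat.mod_eq_of_lt (by omega))⟩
    · have hd := pv_divmod_of s (s - 1) 0 hs0 hs0
      rw [Nat.add_zero, hms] at hd
      exact ⟨by omega, Or.inr hd.1, Or.inl hd.2⟩
    · have hd := pv_divmod_of s (s - 1) (s - 1) hs0 (by omega)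
      have he : s * (s - 1) + (s - 1) = s * s - 1 := by omega
      rw [he] at hd
      exact ⟨by omega, Or.inr hd.1, Or.inr hd.2⟩
  · rintro ⟨hp, hr, hc⟩
    have hd := Nat.div_add_mod p s
    rcases hr with hr | hr <;> rcases hc with hc | hc <;> rw [hr, hc] at hd
    · left; omega
    · right; left; omega
    · right; right; left; rw [hms] at hd; omega
    · right; right; right; rw [hms] at hd; omega

theorem pv_condN_eq (s : ℕ) (rc : Bool) (p : ℕ) :
    pvCondN s rc p = decide ((p / s = 0 ∨ p / s = s - 1 ∨ p % s = 0 ∨ p % s = s - 1)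
      ∧ ¬(rc = true ∧ (p / s = 0 ∨ p / s = s - 1) ∧ (p % s = 0 ∨ p % s = s - 1))) := by
  cases rc <;>
    · rw [Bool.eq_iff_iff]
      simp only [pvCondN, Bool.and_eq_true, Bool.or_eq_true, beq_iff_eq, Bool.not_eq_true',
        Bool.and_eq_false_iff, Bool.or_eq_false_iff, beq_eq_false_iff_ne, decide_eq_true_eq,
        Bool.true_and, Bool.false_and, Bool.not_false, Bool.and_true, Bool.false_eq_true]
      tauto

theorem pv_edge_testBit (s : ℕ) (hs : 2 ≤ s) (p : ℕ) :
    (pvEdgeN s).testBit p =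
      decide (p < s * s ∧ (p / s = 0 ∨ p / s = s - 1 ∨ p % s = 0 ∨ p % s = s - 1)) := by
  have H := pv_edge_iff s hs p
  unfold pvEdgeN
  rw [pv_foldl_lor_testBit, Bool.eq_iff_iff]
  simp only [Nat.testBit_lor, Nat.testBit_shiftLeft, Nat.testBit_two_pow_sub_one,
    pv_testBit_three, List.any_eq_true, List.mem_range, Bool.or_eq_true, Bool.and_eq_true,
    decide_eq_true_eq, ge_iff_le]
  constructor
  · rintro ((h | ⟨h1, h2⟩) | ⟨i, hi, h1, h2⟩)
    · exact H.mp (Or.inl h)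
    · exact H.mp (Or.inr (Or.inl ⟨h1, h2⟩))
    · exact H.mp (Or.inr (Or.inr ⟨i, hi, h1, h2⟩))
  · intro h
    rcases H.mpr h with h | ⟨h1, h2⟩ | ⟨i, hi, h1, h2⟩
    · exact Or.inl (Or.inl h)
    · exact Or.inl (Or.inr ⟨h1, h2⟩)
    · exact Or.inr ⟨i, hi, h1, h2⟩

theorem pv_corner_testBit (s : ℕ) (hs : 2 ≤ s) (p : ℕ) :
    (pvCornerN s).testBit p =
      decide (p < s * s ∧ (p / s = 0 ∨ p / s = s - 1) ∧ (p % s = 0 ∨ p % s = s - 1)) := by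
  have H := pv_corner_iff s hs p
  have hsq : s ≤ s * s := pv_le_sq s
  unfold pvCornerN
  rw [Bool.eq_iff_iff]
  simp only [Nat.testBit_lor, Nat.testBit_shiftLeft, pv_tb_pow_add_one (s - 1) (by omega),
    Bool.or_eq_true, Bool.and_eq_true, decide_eq_true_eq, ge_iff_le]
  constructor
  · intro h
    apply H.mp
    omega
  · intro h
    have := H.mpr h
    omega

theorem pv_bn_testBit (s : ℕ) (rc : Bool) (p : ℕ) :
    (pvBN s rc).testBit p = (decide (p < s * s) && pvCondN s rc p) := by
  unfold pvBN
  rw [pv_foldl_lorif_testBit, Bool.eq_iff_iff]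
  simp only [Nat.zero_testBit, Bool.false_or, List.any_eq_true, List.mem_range,
    Bool.and_eq_true, decide_eq_true_eq, pv_tb_one]
  constructor
  · rintro ⟨k, hk, hc, rfl⟩
    exact ⟨hk, hc⟩
  · rintro ⟨hk, hc⟩
    exact ⟨p, hk, hc, rfl⟩

theorem pv_main (s : ℕ) (hs : 2 ≤ s) (rc : Bool) :
    (if rc then pvEdgeN s - (pvEdgeN s &&& pvCornerN s) else pvEdgeN s) = pvBN s rc := by
  have hEC : pvEdgeN s &&& pvCornerN s = pvCornerN s := by
    apply Nat.eq_of_testBit_eq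
    intro p
    rw [Nat.testBit_land, pv_edge_testBit s hs p, pv_corner_testBit s hs p, Bool.eq_iff_iff]
    simp only [Bool.and_eq_true, decide_eq_true_eq]
    tauto
  cases rc
  · simp only [Bool.false_eq_true, if_false]
    apply Nat.eq_of_testBit_eq
    intro p
    rw [pv_edge_testBit s hs p, pv_bn_testBit, pv_condN_eq, Bool.eq_iff_iff]
    simp only [Bool.and_eq_true, decide_eq_true_eq, Bool.false_eq_true]
    tauto
  · simp only [if_true, hEC]
    have hdisj : pvBN s true &&& pvCornerN s = 0 := by
      apply Nat.eq_of_testBit_eq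
      intro p
      rw [Nat.testBit_land, pv_bn_testBit, pv_condN_eq, pv_corner_testBit s hs p,
        Nat.zero_testBit, Bool.eq_iff_iff]
      simp only [Bool.and_eq_true, decide_eq_true_eq, Bool.false_eq_true, iff_false]
      tauto
    have hunion : pvBN s true ||| pvCornerN s = pvEdgeN s := by
      apply Nat.eq_of_testBit_eq
      intro p
      rw [Nat.testBit_lor, pv_bn_testBit, pv_condN_eq, pv_corner_testBit s hs p,
        pv_edge_testBit s hs p, Bool.eq_iff_iff]
      simp only [Bool.or_eq_true, Bool.and_eq_true, decide_eq_true_eq]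
      tauto
    have hadd := pv_lor_eq_add _ _ hdisj
    omega

-- ===== VERDICT (by name: the statement is the Claim_ definition above) =====
theorem edge_mask_spec : Claim_equal_edge_mask := by
  intro size rc _ hpre
  unfold Spec_edge_mask
  unfold Pre_edge_mask at hpre
  obtain ⟨s, rfl⟩ : ∃ s : ℕ, size = (s : ℤ) := ⟨size.toNat, (Int.toNat_of_nonneg (by omega)).symm⟩
  have hs1 : 1 ≤ s := by exact_mod_cast hpre
  rcases Nat.lt_or_ge s 2 with h2 | h2
  · interval_cases s
    · revert rc; decide
  · rw [pv_A_eq s h2 rc, pv_B_eq s (by omega) rc, pv_main s h2 rc]
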